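-- pv_equiv track=rewrite | github.com/54yyyu/d3_evaluation_pipeline | scripts/run_custom_evaluation.py | get_metric_groups
-- ===== SOURCE A (Python) =====
-- from typing import List, Dict, Any, Optional
--
-- def get_metric_groups(metrics: List[str]) -> Dict[str, List[str]]:
--     """Group metrics by evaluation type."""
--     functional_metrics = ["conditional_fidelity", "frechet_distance", "distribution_shift"]
--     sequence_metrics = ["percent_identity", "kmer_analysis", "discriminatability", "diversity"]
--     compositional_metrics = ["motif_enrichment", "motif_cooccurrence", "attribution_consistency"]
--
--     groups = {}
--
--     if any(m in functional_metrics for m in metrics):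
--         groups["functional"] = [m for m in metrics if m in functional_metrics]
--
--     if any(m in sequence_metrics for m in metrics):
--         groups["sequence"] = [m for m in metrics if m in sequence_metrics]
--
--     if any(m in compositional_metrics for m in metrics):
--         groups["compositional"] = [m for m in metrics if m in compositional_metrics]
--
--     return groups
-- ===== SOURCE B (Python) =====
-- def get_metric_groups(metrics):
--     """Group metrics by evaluation type (single-pass table lookup)."""
--     category_of = {
--         "conditional_fidelity": "functional",
--         "frechet_distance": "functional",
--         "distribution_shift": "functional",
--         "percent_identity": "sequence",
--         "kmer_analysis": "sequence",
--         "discriminatability": "sequence",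
--         "diversity": "sequence",
--         "motif_enrichment": "compositional",
--         "motif_cooccurrence": "compositional",
--         "attribution_consistency": "compositional",
--     }
--     buckets = {"functional": [], "sequence": [], "compositional": []}
--     for m in metrics:
--         cat = category_of.get(m)
--         if cat is not None:
--             buckets[cat].append(m)
--     return {cat: ms for cat, ms in buckets.items() if ms}
-- ===== Notes on version B (the rewrite author's own statement) =====
-- stated objective: faster
-- what changed: Replaces three any-scans plus three filter-comprehensions (each doing a linear membership test per element) with one pass over metrics using a precomputed metric-to-category table that appends into per-category buckets.
import Mathlib
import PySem

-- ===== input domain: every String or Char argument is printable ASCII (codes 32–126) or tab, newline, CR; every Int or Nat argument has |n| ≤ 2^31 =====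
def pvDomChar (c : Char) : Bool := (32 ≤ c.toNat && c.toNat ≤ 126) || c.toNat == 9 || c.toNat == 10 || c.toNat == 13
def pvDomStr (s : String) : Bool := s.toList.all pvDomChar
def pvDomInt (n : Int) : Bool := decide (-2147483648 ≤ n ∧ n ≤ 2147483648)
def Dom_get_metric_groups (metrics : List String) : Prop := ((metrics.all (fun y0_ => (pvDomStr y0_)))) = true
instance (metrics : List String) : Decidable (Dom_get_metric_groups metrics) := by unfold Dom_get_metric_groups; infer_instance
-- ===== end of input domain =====

-- B replaces A's three any-scans plus three filter passes by one table-driven pass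
-- over metrics that appends into per-category buckets (objective: faster, constant factor).

-- ===== PORT A =====
-- A: three fixed category lists, three any-tests, three filter comprehensions,
-- groups built as a dict; returned as its association list (.items).
def get_metric_groups (metrics : List String) : List (String × List String) :=
  let functional_metrics : List String := ["conditional_fidelity", "frechet_distance", "distribution_shift"]
  let sequence_metrics : List String := ["percent_identity", "kmer_analysis", "discriminatability", "diversity"]
  let compositional_metrics : List String := ["motif_enrichment", "motif_cooccurrence", "attribution_consistency"]
  let groups : PySem.Dict String (List String) := PySem.Dict.empty
  let groups := if metrics.any (fun m => functional_metrics.contains m) then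
      groups.insert "functional" (metrics.filter (fun m => functional_metrics.contains m)) else groups
  let groups := if metrics.any (fun m => sequence_metrics.contains m) then
      groups.insert "sequence" (metrics.filter (fun m => sequence_metrics.contains m)) else groups
  let groups := if metrics.any (fun m => compositional_metrics.contains m) then
      groups.insert "compositional" (metrics.filter (fun m => compositional_metrics.contains m)) else groups
  groups.items

-- ===== PORT B =====
-- B: the metric→category table (a dict literal), per-category buckets, one foldl
-- over metrics doing a lookup + append; finally keep only non-empty buckets
-- (the dict comprehension over buckets.items — keys already distinct).
def pvCategoryOf : PySem.Dict String String := PySem.Dict.ofList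
  [("conditional_fidelity", "functional"), ("frechet_distance", "functional"), ("distribution_shift", "functional"),
   ("percent_identity", "sequence"), ("kmer_analysis", "sequence"), ("discriminatability", "sequence"),
   ("diversity", "sequence"),
   ("motif_enrichment", "compositional"), ("motif_cooccurrence", "compositional"), ("attribution_consistency", "compositional")]

def get_metric_groups_alt (metrics : List String) : List (String × List String) :=
  let buckets : PySem.Dict String (List String) :=
    PySem.Dict.ofList [("functional", []), ("sequence", []), ("compositional", [])]
  let buckets := metrics.foldl (fun d m =>
      match pvCategoryOf.get? m with
      | some cat => d.modify cat [] (fun l => l ++ [m])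
      | none => d) buckets
  buckets.items.filter (fun p => !p.2.isEmpty)

-- ===== PRECONDITION & SPEC =====
def Spec_get_metric_groups (metrics : List String) (out : List (String × List String)) : Prop := out = get_metric_groups_alt metrics
instance (metrics : List String) (out : List (String × List String)) : Decidable (Spec_get_metric_groups metrics out) := by unfold Spec_get_metric_groups; infer_instance

-- ===== CLAIM (what is proved, stated in full; the proofs are below) =====
def Claim_equal_get_metric_groups : Prop := ∀ (metrics : List String), Dom_get_metric_groups metrics → Spec_get_metric_groups metrics (get_metric_groups metrics)

-- ===== LEMMAS AND PROOFS =====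

-- any = not-isEmpty of filter
theorem pv_any_eq_filter_isEmpty (l : List String) (p : String → Bool) :
    l.any p = !(l.filter p).isEmpty := by
  induction l with
  | nil => rfl
  | cons x xs ih => by_cases h : p x <;> simp [List.any_cons, h, ih]

def pvF : List String := ["conditional_fidelity", "frechet_distance", "distribution_shift"]
def pvS : List String := ["percent_identity", "kmer_analysis", "discriminatability", "diversity"]
def pvC : List String := ["motif_enrichment", "motif_cooccurrence", "attribution_consistency"]

-- step lemmas: effect of one iteration of B's pass on the three-bucket state
theorem pv_stepF (f s c : List String) (m : String) (h : pvCategoryOf.get? m = some "functional") :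
    (match pvCategoryOf.get? m with
     | some cat => (PySem.Dict.mk [("functional", f), ("sequence", s), ("compositional", c)]).modify cat [] (fun l => l ++ [m])
     | none => PySem.Dict.mk [("functional", f), ("sequence", s), ("compositional", c)]) =
    PySem.Dict.mk [("functional", f ++ [m]), ("sequence", s), ("compositional", c)] := by rw [h]; rfl

theorem pv_stepS (f s c : List String) (m : String) (h : pvCategoryOf.get? m = some "sequence") :
    (match pvCategoryOf.get? m with
     | some cat => (PySem.Dict.mk [("functional", f), ("sequence", s), ("compositional", c)]).modify cat [] (fun l => l ++ [m])
     | none => PySem.Dict.mk [("functional", f), ("sequence", s), ("compositional", c)]) =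
    PySem.Dict.mk [("functional", f), ("sequence", s ++ [m]), ("compositional", c)] := by rw [h]; rfl

theorem pv_stepC (f s c : List String) (m : String) (h : pvCategoryOf.get? m = some "compositional") :
    (match pvCategoryOf.get? m with
     | some cat => (PySem.Dict.mk [("functional", f), ("sequence", s), ("compositional", c)]).modify cat [] (fun l => l ++ [m])
     | none => PySem.Dict.mk [("functional", f), ("sequence", s), ("compositional", c)]) =
    PySem.Dict.mk [("functional", f), ("sequence", s), ("compositional", c ++ [m])] := by rw [h]; rfl

theorem pv_stepN (f s c : List String) (m : String) (h : pvCategoryOf.get? m = none) :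
    (match pvCategoryOf.get? m with
     | some cat => (PySem.Dict.mk [("functional", f), ("sequence", s), ("compositional", c)]).modify cat [] (fun l => l ++ [m])
     | none => PySem.Dict.mk [("functional", f), ("sequence", s), ("compositional", c)]) =
    PySem.Dict.mk [("functional", f), ("sequence", s), ("compositional", c)] := by rw [h]

-- loop invariant of B's single pass
theorem pv_loop (ms : List String) (f s c : List String) :
    ms.foldl (fun d m =>
      match pvCategoryOf.get? m with
      | some cat => d.modify cat [] (fun l => l ++ [m])
      | none => d)
      (PySem.Dict.mk [("functional", f), ("sequence", s), ("compositional", c)]) =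
    PySem.Dict.mk [("functional", f ++ ms.filter (fun m => pvF.contains m)),
                   ("sequence", s ++ ms.filter (fun m => pvS.contains m)),
                   ("compositional", c ++ ms.filter (fun m => pvC.contains m))] := by
  induction ms generalizing f s c with
  | nil => simp
  | cons m ms ih =>
    simp only [List.foldl_cons]
    by_cases hf : pvF.contains m
    · have hm : m = "conditional_fidelity" ∨ m = "frechet_distance" ∨ m = "distribution_shift" := by
        simpa [pvF] using hf
      rcases hm with h | h | h <;> subst h <;>
        rw [pv_stepF _ _ _ _ (by decide), ih] <;>
        simp [pvF, pvS, pvC]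
    · by_cases hs : pvS.contains m
      · have hm : m = "percent_identity" ∨ m = "kmer_analysis" ∨ m = "discriminatability" ∨ m = "diversity" := by
          simpa [pvS] using hs
        rcases hm with h | h | h | h <;> subst h <;>
          rw [pv_stepS _ _ _ _ (by decide), ih] <;>
          simp [pvF, pvS, pvC]
      · by_cases hc : pvC.contains m
        · have hm : m = "motif_enrichment" ∨ m = "motif_cooccurrence" ∨ m = "attribution_consistency" := by
            simpa [pvC] using hc
          rcases hm with h | h | h <;> subst h <;>
            rw [pv_stepC _ _ _ _ (by decide), ih] <;>
            simp [pvF, pvS, pvC]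
        · have hfm := hf; have hsm := hs; have hcm := hc
          simp only [Bool.not_eq_true] at hfm hsm hcm
          simp [pvF] at hf
          simp [pvS] at hs
          simp [pvC] at hc
          obtain ⟨h1, h2, h3⟩ := hf
          obtain ⟨h4, h5, h6, h7⟩ := hs
          obtain ⟨h8, h9, h10⟩ := hc
          have hget : pvCategoryOf.get? m = none := by
            rw [show pvCategoryOf = PySem.Dict.mk
              [("conditional_fidelity", "functional"), ("frechet_distance", "functional"), ("distribution_shift", "functional"),
               ("percent_identity", "sequence"), ("kmer_analysis", "sequence"), ("discriminatability", "sequence"),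
               ("diversity", "sequence"),
               ("motif_enrichment", "compositional"), ("motif_cooccurrence", "compositional"), ("attribution_consistency", "compositional")] from by decide]
            simp [PySem.Dict.get?,
                  Ne.symm h1, Ne.symm h2, Ne.symm h3, Ne.symm h4, Ne.symm h5,
                  Ne.symm h6, Ne.symm h7, Ne.symm h8, Ne.symm h9, Ne.symm h10]
          rw [pv_stepN _ _ _ _ hget, ih]
          simp [List.filter_cons, pvF, pvS, pvC]
          exact ⟨⟨h1, h2, h3⟩, ⟨h4, h5, h6, h7⟩, h8, h9, h10⟩

-- assembling the result from the three (possibly empty) category lists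
theorem pv_assemble (a b c : List String) :
    (let g : PySem.Dict String (List String) := PySem.Dict.empty
     let g := if !a.isEmpty then g.insert "functional" a else g
     let g := if !b.isEmpty then g.insert "sequence" b else g
     let g := if !c.isEmpty then g.insert "compositional" c else g
     g.items) =
    (PySem.Dict.mk [("functional", a), ("sequence", b), ("compositional", c)]).items.filter (fun p => !p.2.isEmpty) := by
  rcases a with _ | ⟨x, a⟩ <;> rcases b with _ | ⟨y, b⟩ <;> rcases c with _ | ⟨z, c⟩ <;> rfl

-- ===== VERDICT (by name: the statement is the Claim_ definition above) =====
theorem get_metric_groups_spec : Claim_equal_get_metric_groups := by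
  intro metrics _
  unfold Spec_get_metric_groups get_metric_groups get_metric_groups_alt
  dsimp only
  rw [pv_any_eq_filter_isEmpty, pv_any_eq_filter_isEmpty, pv_any_eq_filter_isEmpty]
  have hB := pv_loop metrics [] [] []
  simp only [pvF, pvS, pvC, List.nil_append] at hB
  rw [show (PySem.Dict.ofList [("functional", ([] : List String)), ("sequence", []), ("compositional", [])]) =
        PySem.Dict.mk [("functional", []), ("sequence", []), ("compositional", [])] from rfl, hB]
  exact pv_assemble _ _ _
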